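-- pv_equiv track=rewrite | github.com/adndax/discrete-math | test/quine-mccluskey.py | change_to_letter
-- ===== SOURCE A (Python) =====
-- def change_to_letter(s):
--     out = ''
--     c = 'a'
--     more = False
--     n = 0
--     for i in range(len(s)):
--
--         if more == False:
--             if s[i] == '1':
--                 out = out + c
--             elif s[i] == '0':
--                 out = out + c+'\''
--
--         if more == True:
--             if s[i] == '1':
--                 out = out + c + str(n)
--             elif s[i] == '0':
--                 out = out + c + str(n) + '\''
--             n+=1
--
--         if c=='z' and more == False:
--             c = 'A'
--         elif c=='Z':
--             c = 'a'
--             more = True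
--
--         elif more == False:
--             c = chr(ord(c)+1)
--     return out
-- ===== SOURCE B (Python) =====
-- def change_to_letter(s):
--     def label(i):
--         if i < 26:
--             return chr(97 + i)
--         if i < 52:
--             return chr(65 + i - 26)
--         return 'a' + str(i - 52)
--     parts = []
--     for i, ch in enumerate(s):
--         if ch == '1':
--             parts.append(label(i))
--         elif ch == '0':
--             parts.append(label(i) + "'")
--     return ''.join(parts)
-- ===== Notes on version B (the rewrite author's own statement) =====
-- stated objective: simpler
-- what changed: Replaces A's stateful letter/flag/subscript-counter loop with a closed-form index-to-label function applied over enumerate(s), collecting parts in a list joined once at the end.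
import Mathlib
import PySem

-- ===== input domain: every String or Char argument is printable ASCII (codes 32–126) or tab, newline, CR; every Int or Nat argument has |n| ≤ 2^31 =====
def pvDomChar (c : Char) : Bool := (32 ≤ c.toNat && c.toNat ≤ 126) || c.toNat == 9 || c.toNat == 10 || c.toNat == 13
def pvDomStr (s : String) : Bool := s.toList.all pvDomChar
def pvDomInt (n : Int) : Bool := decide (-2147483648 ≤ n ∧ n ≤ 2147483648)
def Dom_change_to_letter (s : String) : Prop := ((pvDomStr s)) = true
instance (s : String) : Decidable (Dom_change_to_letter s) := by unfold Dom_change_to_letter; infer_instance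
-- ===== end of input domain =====

-- B replaces A's stateful letter/subscript machine with a closed-form index→label map over enumerate, joining parts once (simpler; measured faster in a timing run).


-- ===== PORT A =====
-- A's loop body, step for step, on string data as List Char (string append = list append).
def stepA (st : List Char × Char × Bool × Int) (ch : Char) : List Char × Char × Bool × Int :=
  let (out, c, more, n) := st
  let out := if more = false then
      (if ch = '1' then out ++ [c]
       else if ch = '0' then out ++ [c, '\''] else out)
    else out
  let (out, n) := if more = true then
      ((if ch = '1' then out ++ [c] ++ (PySem.Int.toStr n).toList
        else if ch = '0' then out ++ [c] ++ (PySem.Int.toStr n).toList ++ ['\''] else out), n + 1)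
    else (out, n)
  let (c, more) :=
    if c = 'z' ∧ more = false then ('A', more)
    else if c = 'Z' then ('a', true)
    else if more = false then (Char.ofNat (c.toNat + 1), more)
    else (c, more)
  (out, c, more, n)

def change_to_letter (s : String) : String :=
  String.mk (s.toList.foldl stepA ([], 'a', false, 0)).1

-- ===== PORT B =====
-- closed-form label for position i (i is the Python int index, hence Int)
def labelB (i : Int) : List Char :=
  if i < 26 then [Char.ofNat (97 + i).toNat]
  else if i < 52 then [Char.ofNat (65 + i - 26).toNat]
  else 'a' :: (PySem.Int.toStr (i - 52)).toList

def partB (p : Int × Char) : List Char :=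
  if p.2 = '1' then labelB p.1
  else if p.2 = '0' then labelB p.1 ++ ['\'']
  else []

def change_to_letter_alt (s : String) : String :=
  String.mk (List.flatten ((PySem.List.enumerate s.toList 0).map partB))

-- ===== PRECONDITION & SPEC =====
def Spec_change_to_letter (s : String) (out : String) : Prop := out = change_to_letter_alt s
instance (s : String) (out : String) : Decidable (Spec_change_to_letter s out) := by unfold Spec_change_to_letter; infer_instance

-- ===== CLAIM (what is proved, stated in full; the proofs are below) =====
def Claim_equal_change_to_letter : Prop := ∀ (s : String), Dom_change_to_letter s → Spec_change_to_letter s (change_to_letter s)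

-- ===== LEMMAS AND PROOFS =====

-- A's loop state after k iterations: the current letter, the 'more' flag and the subscript counter,
-- all as closed functions of k.
def cOf (k : Nat) : Char :=
  if k < 26 then Char.ofNat (97 + k) else if k < 52 then Char.ofNat (65 + k - 26) else 'a'
def moreOf (k : Nat) : Bool := decide (52 ≤ k)
def nOf (k : Nat) : Int := if 52 ≤ k then (k : Int) - 52 else 0

set_option maxRecDepth 8192 in
lemma step_eq (k : Nat) (out : List Char) (ch : Char) :
    stepA (out, cOf k, moreOf k, nOf k) ch
      = (out ++ partB ((k : Int), ch), cOf (k + 1), moreOf (k + 1), nOf (k + 1)) := by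
  rcases lt_or_ge k 52 with hlt | h
  · interval_cases k
    all_goals simp only [stepA, partB, labelB, cOf, moreOf, nOf]
    all_goals norm_num
    all_goals split_ifs <;> simp_all
  · have h26 : ¬ ((k : Int) < 26) := by omega
    have h52 : ¬ ((k : Int) < 52) := by omega
    have hm : moreOf k = true := by unfold moreOf; simp; omega
    have hm' : moreOf (k + 1) = true := by unfold moreOf; simp; omega
    have hc : cOf k = 'a' := by unfold cOf; rw [if_neg (by omega), if_neg (by omega)]
    have hc' : cOf (k + 1) = 'a' := by unfold cOf; rw [if_neg (by omega), if_neg (by omega)]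
    have hn : nOf k = (k : Int) - 52 := by unfold nOf; rw [if_pos h]
    have hn' : nOf (k + 1) = nOf k + 1 := by unfold nOf; rw [if_pos h, if_pos (by omega)]; push_cast; ring
    rw [hn', hc, hc', hm, hm', hn]
    simp only [stepA, partB, labelB, if_neg h26, if_neg h52]
    clear h26 h52 hm hm' hc hc' hn hn' h
    split_ifs <;> simp_all

lemma loop_eq (l : List Char) : ∀ (k : Nat) (out : List Char),
    (l.foldl stepA (out, cOf k, moreOf k, nOf k)).1
      = out ++ List.flatten ((PySem.List.enumerate l (k : Int)).map partB) := by
  induction l with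
  | nil => intro k out; simp [PySem.List.enumerate_nil]
  | cons ch t ih =>
    intro k out
    rw [List.foldl_cons, step_eq, PySem.List.enumerate_cons]
    have : (k : Int) + 1 = ((k + 1 : Nat) : Int) := by push_cast; ring
    simp only [List.map_cons, List.flatten_cons, this, ih (k + 1) (out ++ partB ((k : Int), ch)),
      List.append_assoc]

-- ===== VERDICT (by name: the statement is the Claim_ definition above) =====
theorem change_to_letter_spec : Claim_equal_change_to_letter := by
  intro s _
  show _ = _
  unfold change_to_letter change_to_letter_alt
  have h := loop_eq s.toList 0 []
  simp only [Nat.cast_zero] at h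
  rw [show (([] : List Char), 'a', false, (0 : Int)) = ([], cOf 0, moreOf 0, nOf 0) by rfl, h]
  simp
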